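-- pv_equiv track=rewrite | github.com/wxm888888/openterminal | evaluation/evaluator.py | check_turn_count_majority
-- ===== SOURCE A (Python) =====
-- from typing import Dict, List, Tuple
--
-- def check_turn_count_majority(all_results: Dict[str, Dict], winner: str) -> Tuple[bool, List[str], int]:
--     """
--     检查是否有半数以上模型的轮次数量相同，且winner在其中
--
--     Args:
--         all_results: 所有模型的解析结果
--         winner: winner模型的key
--
--     Returns:
--         (是否通过, 轮次数量相同的模型列表, 共识轮次数)
--     """
--     total_models = len(all_results)
--     threshold = total_models / 2
--
--     # 统计每个模型的轮次数
--     turn_counts = {}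
--     for model, result in all_results.items():
--         turn_counts[model] = len(result.get('turns', []))
--
--     # 按轮次数分组
--     count_to_models = {}
--     for model, count in turn_counts.items():
--         if count not in count_to_models:
--             count_to_models[count] = []
--         count_to_models[count].append(model)
--
--     # 找到winner所在的组
--     winner_turn_count = turn_counts.get(winner)
--     if winner_turn_count is None:
--         return False, [], 0
--
--     winner_group = count_to_models.get(winner_turn_count, [])
--
--     # 检查winner所在组是否超过半数
--     is_majority = len(winner_group) > threshold
--
--     return is_majority, winner_group, winner_turn_count
-- ===== SOURCE B (Python) =====
-- def check_turn_count_majority(all_results, winner):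
--     if winner not in all_results:
--         return False, [], 0
--     winner_turn_count = len(all_results[winner].get('turns', []))
--     winner_group = [m for m, r in all_results.items()
--                     if len(r.get('turns', [])) == winner_turn_count]
--     return len(winner_group) * 2 > len(all_results), winner_group, winner_turn_count
-- ===== Notes on version B (the rewrite author's own statement) =====
-- stated objective: simpler
-- what changed: Drops A's two intermediate dicts (per-model turn counts and the count-to-models grouping table): B looks up the winner's turn count directly and builds the winner group in a single filter pass over all_results; Pre_ only requires distinct keys, which every Python dict has.
import Mathlib
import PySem

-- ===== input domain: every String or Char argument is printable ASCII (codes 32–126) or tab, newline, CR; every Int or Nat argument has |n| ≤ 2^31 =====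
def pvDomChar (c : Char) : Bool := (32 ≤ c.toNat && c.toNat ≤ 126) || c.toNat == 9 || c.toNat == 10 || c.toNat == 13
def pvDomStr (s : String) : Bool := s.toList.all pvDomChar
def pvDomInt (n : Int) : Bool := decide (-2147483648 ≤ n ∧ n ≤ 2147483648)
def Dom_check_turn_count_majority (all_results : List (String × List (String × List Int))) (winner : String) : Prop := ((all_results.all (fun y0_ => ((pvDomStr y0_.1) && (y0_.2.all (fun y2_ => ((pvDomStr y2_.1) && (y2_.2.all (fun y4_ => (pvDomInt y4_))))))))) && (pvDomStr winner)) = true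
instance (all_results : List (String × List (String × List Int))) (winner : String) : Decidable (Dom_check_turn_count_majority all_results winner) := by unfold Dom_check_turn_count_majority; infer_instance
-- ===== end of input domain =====

-- B drops A's two intermediate dicts and computes the winner's turn count and group in one direct lookup + one filter pass; same return value.


-- ===== PORT A =====
-- result.get('turns', []) : 'result' is a Python dict, read through PySem.Dict
def pvTurnsA (r : List (String × List Int)) : Int :=
  ((PySem.Dict.mk r).getD "turns" []).length

def check_turn_count_majority (all_results : List (String × List (String × List Int))) (winner : String) : Bool × List String × Int :=
  let total_models : Int := all_results.length
  -- threshold = total_models / 2 is a Python float; 'len(winner_group) > threshold' is computed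
  -- exactly below as 2 * len(winner_group) > total_models (exact for these magnitudes)
  let turn_counts : PySem.Dict String Int :=
    all_results.foldl (fun d p => d.insert p.1 (pvTurnsA p.2)) PySem.Dict.empty
  let count_to_models : PySem.Dict Int (List String) :=
    turn_counts.items.foldl (fun d p =>
      let d' := if d.contains p.2 then d else d.insert p.2 []
      d'.modify p.2 [] (· ++ [p.1])) PySem.Dict.empty
  match turn_counts.get? winner with
  | none => (false, [], 0)
  | some winner_turn_count =>
    let winner_group := count_to_models.getD winner_turn_count []
    (decide (2 * (winner_group.length : Int) > total_models), winner_group, winner_turn_count)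

-- ===== PORT B =====
def pvTurnsB (r : List (String × List Int)) : Int :=
  ((PySem.Dict.mk r).getD "turns" []).length

def check_turn_count_majority_alt (all_results : List (String × List (String × List Int))) (winner : String) : Bool × List String × Int :=
  match all_results.find? (fun p => p.1 == winner) with
  | none => (false, [], 0)
  | some pw =>
    let winner_turn_count := pvTurnsB pw.2
    let winner_group := (all_results.filter (fun p => pvTurnsB p.2 == winner_turn_count)).map (·.1)
    (decide ((winner_group.length : Int) * 2 > (all_results.length : Int)), winner_group, winner_turn_count)

-- ===== PRECONDITION & SPEC =====
-- Pre_ only requires the assoc lists to have distinct keys, the shape every Python dict has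
-- (a duplicate-key assoc list corresponds to no Python input of A); it excludes nothing A returns on.
def Pre_check_turn_count_majority (all_results : List (String × List (String × List Int))) (winner : String) : Prop :=
  (all_results.map (·.1)).Nodup ∧ ∀ p ∈ all_results, (p.2.map (·.1)).Nodup
instance (all_results : List (String × List (String × List Int))) (winner : String) : Decidable (Pre_check_turn_count_majority all_results winner) := by unfold Pre_check_turn_count_majority; infer_instance

def pvWitness_check_turn_count_majority : (List (String × List (String × List Int))) × String :=
  ([("a", [("turns", [1, 2])]), ("b", [("turns", [1, 2])]), ("c", [])], "a")

def Spec_check_turn_count_majority (all_results : List (String × List (String × List Int))) (winner : String) (out : Bool × List String × Int) : Prop := out = check_turn_count_majority_alt all_results winner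
instance (all_results : List (String × List (String × List Int))) (winner : String) (out : Bool × List String × Int) : Decidable (Spec_check_turn_count_majority all_results winner out) := by unfold Spec_check_turn_count_majority; infer_instance

-- ===== CLAIM (what is proved, stated in full; the proofs are below) =====
def Claim_equal_check_turn_count_majority : Prop := ∀ (all_results : List (String × List (String × List Int))) (winner : String), Dom_check_turn_count_majority all_results winner → Pre_check_turn_count_majority all_results winner → Spec_check_turn_count_majority all_results winner (check_turn_count_majority all_results winner)

-- ===== LEMMAS AND PROOFS =====

-- lookup in the dict built from distinct-keyed pairs = first match in the pair list
theorem pv_get?_mk_map (l : List (String × List (String × List Int))) (w : String) :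
    (PySem.Dict.mk (l.map (fun p => (p.1, pvTurnsA p.2)))).get? w
      = (l.find? (fun p => p.1 == w)).map (fun p => pvTurnsA p.2) := by
  induction l with
  | nil => rfl
  | cons q t ih =>
    simp only [List.map_cons, PySem.Dict.get?_mk_cons, List.find?]
    by_cases h : q.1 == w
    · simp [h]
    · simp only [h]; simpa using ih

-- the grouping loop of A, read back through getD: value at c = accumulated ++ models whose count is c
theorem pv_group_getD (l : List (String × Int)) (d : PySem.Dict Int (List String)) (c : Int) :
    (l.foldl (fun d p =>
        let d' := if d.contains p.2 then d else d.insert p.2 []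
        d'.modify p.2 [] (· ++ [p.1])) d).getD c []
      = d.getD c [] ++ (l.filter (fun p => p.2 == c)).map (·.1) := by
  induction l generalizing d with
  | nil => simp
  | cons q t ih =>
    rw [List.foldl_cons, ih]
    have hstep : ((if d.contains q.2 then d else d.insert q.2 []).modify q.2 [] (· ++ [q.1])).getD c []
        = d.getD c [] ++ (if q.2 == c then [q.1] else []) := by
      by_cases h2 : d.contains q.2
      · rw [if_pos h2, PySem.Dict.getD_modify]
        by_cases h : c = q.2
        · simp [h]
        · simp [h, Ne.symm h]
      · rw [if_neg h2, PySem.Dict.getD_modify]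
        have h2' : d.contains q.2 = false := by simpa using h2
        by_cases h : c = q.2
        · simp [h, PySem.Dict.getD_insert_self, PySem.Dict.getD_of_not_contains d _ h2']
        · simp [h, Ne.symm h, PySem.Dict.getD_insert]
    rw [hstep, List.filter_cons]
    by_cases hq : q.2 == c
    · simp [hq]
    · simp [hq]

theorem check_turn_count_majority_eq (l : List (String × List (String × List Int))) (w : String)
    (hnd : (l.map (·.1)).Nodup) :
    check_turn_count_majority l w = check_turn_count_majority_alt l w := by
  simp only [check_turn_count_majority, check_turn_count_majority_alt]
  have htc : (l.foldl (fun d p => d.insert p.1 (pvTurnsA p.2)) PySem.Dict.empty)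
      = PySem.Dict.mk (l.map (fun p => (p.1, pvTurnsA p.2))) := by
    apply PySem.Dict.ext
    rw [PySem.Dict.items_foldl_insert_fresh _ _ _ _ (fun a _ => PySem.Dict.contains_empty _) hnd]
    simp [PySem.Dict.empty]
  rw [htc, pv_get?_mk_map]
  cases hf : l.find? (fun p => p.1 == w) with
  | none => simp
  | some pw =>
    simp only [Option.map_some]
    have hgrp : ((PySem.Dict.mk (l.map (fun p => (p.1, pvTurnsA p.2)))).items.foldl
        (fun d p =>
          let d' := if d.contains p.2 then d else d.insert p.2 []
          d'.modify p.2 [] (· ++ [p.1])) PySem.Dict.empty).getD (pvTurnsA pw.2) []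
        = (l.filter (fun p => pvTurnsA p.2 == pvTurnsA pw.2)).map (·.1) := by
      rw [pv_group_getD]
      simp [List.filter_map, Function.comp_def, List.map_map]
    rw [hgrp]
    simp [pvTurnsA, pvTurnsB, Int.mul_comm]

-- ===== VERDICT (by name: the statement is the Claim_ definition above) =====
theorem check_turn_count_majority_spec : Claim_equal_check_turn_count_majority := by
  intro l w _ hpre
  exact check_turn_count_majority_eq l w hpre.1
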